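-- pv_equiv track=rewrite | github.com/dioptratool/dioptra-web | website/data_loading/insight_comparison_data.py | check_for_duplicate_parameter_labels
-- ===== SOURCE A (Python) =====
-- def check_for_duplicate_parameter_labels(row: dict) -> bool:
--     keys = [
--         "output_metric_parameter_label_1",
--         "output_metric_parameter_label_2",
--         "output_metric_parameter_label_3",
--         "output_metric_parameter_label_4",
--     ]
--     filtered_values = [row.get(key) for key in keys if row.get(key) not in (None, "")]
--     return len(filtered_values) != len(set(filtered_values))
-- ===== SOURCE B (Python) =====
-- def check_for_duplicate_parameter_labels(row: dict) -> bool: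
--     # Pairwise duplicate scan: compare each value against the values after it.
--     # No set is built; a non-empty head equal to any later value is a duplicate
--     # (the later value is then automatically non-empty too).
--     def has_dup(vals):
--         if not vals:
--             return False
--         head, rest = vals[0], vals[1:]
--         if head not in (None, "") and any(head == v for v in rest):
--             return True
--         return has_dup(rest)
--
--     return has_dup([
--         row.get("output_metric_parameter_label_1"),
--         row.get("output_metric_parameter_label_2"),
--         row.get("output_metric_parameter_label_3"),
--         row.get("output_metric_parameter_label_4"),
--     ])
-- ===== Notes on version B (the rewrite author's own statement) =====
-- stated objective: alternative
-- what changed: Replaces the filtered-list build plus len-vs-len(set) hashing comparison with a recursive pairwise scan that compares each non-empty value against the values after it, using no set and no filtering pass.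
import Mathlib
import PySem

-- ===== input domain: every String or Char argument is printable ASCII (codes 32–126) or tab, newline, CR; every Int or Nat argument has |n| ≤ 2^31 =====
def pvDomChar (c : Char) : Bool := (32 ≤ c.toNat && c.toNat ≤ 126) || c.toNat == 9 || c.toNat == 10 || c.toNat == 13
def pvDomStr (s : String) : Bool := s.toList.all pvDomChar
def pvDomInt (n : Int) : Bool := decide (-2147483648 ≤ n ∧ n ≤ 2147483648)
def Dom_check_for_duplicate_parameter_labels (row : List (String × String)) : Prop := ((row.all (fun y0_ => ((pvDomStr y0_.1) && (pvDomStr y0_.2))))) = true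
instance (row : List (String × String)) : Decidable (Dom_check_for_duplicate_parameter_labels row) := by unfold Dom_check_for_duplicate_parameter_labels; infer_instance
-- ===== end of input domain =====

-- ===== PORT A =====
-- B replaces A's filtered-list + len-vs-len(set) comparison with a recursive pairwise
-- head-vs-rest scan that uses no set (alternative decomposition, return value identical).
def pvKeys : List String :=
  ["output_metric_parameter_label_1",
   "output_metric_parameter_label_2",
   "output_metric_parameter_label_3",
   "output_metric_parameter_label_4"]

def check_for_duplicate_parameter_labels (row : List (String × String)) : Bool :=
  -- filtered_values = [row.get(key) for key in keys if row.get(key) not in (None, "")]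
  let filtered_values : List (Option String) :=
    (pvKeys.map (fun k => (PySem.Dict.mk row).get? k)).filter
      (fun v => !(v == none || v == some ""))
  -- len(filtered_values) != len(set(filtered_values))
  decide (filtered_values.length ≠ (PySem.Set.ofList filtered_values).length)

-- ===== PORT B =====
def pvHasDup : List (Option String) → Bool
  | [] => false
  | head :: rest =>
    if (!(head == none || head == some "")) && rest.any (fun v => head == v) then true
    else pvHasDup rest

def check_for_duplicate_parameter_labels_alt (row : List (String × String)) : Bool :=
  pvHasDup
    [(PySem.Dict.mk row).get? "output_metric_parameter_label_1",
     (PySem.Dict.mk row).get? "output_metric_parameter_label_2",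
     (PySem.Dict.mk row).get? "output_metric_parameter_label_3",
     (PySem.Dict.mk row).get? "output_metric_parameter_label_4"]

-- ===== PRECONDITION & SPEC =====
def Spec_check_for_duplicate_parameter_labels (row : List (String × String)) (out : Bool) : Prop := out = check_for_duplicate_parameter_labels_alt row
instance (row : List (String × String)) (out : Bool) : Decidable (Spec_check_for_duplicate_parameter_labels row out) := by unfold Spec_check_for_duplicate_parameter_labels; infer_instance

-- ===== CLAIM (what is proved, stated in full; the proofs are below) =====
def Claim_equal_check_for_duplicate_parameter_labels : Prop := ∀ (row : List (String × String)), Dom_check_for_duplicate_parameter_labels row → Spec_check_for_duplicate_parameter_labels row (check_for_duplicate_parameter_labels row)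

-- ===== LEMMAS AND PROOFS =====

lemma length_ofList_eq_iff {α : Type} [BEq α] [LawfulBEq α] (xs : List α) :
    (PySem.Set.ofList xs).length = xs.length ↔ xs.Nodup := by
  constructor
  · intro h
    have hsub : PySem.Set.ofList xs ⊆ xs := fun x hx =>
      (PySem.Set.mem_ofList xs x).1 hx
    have hnd : (PySem.Set.ofList xs).Nodup := PySem.Set.nodup_ofList xs
    have hperm : (PySem.Set.ofList xs).Perm xs :=
      (hnd.subperm hsub).perm_of_length_le (le_of_eq h.symm)
    exact hperm.nodup_iff.mp hnd
  · intro h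
    rw [PySem.Set.ofList_eq_self_of_nodup xs h]

-- the pairwise scan detects exactly non-Nodup-ness of the good-filtered list
lemma pvHasDup_eq_not_nodup (xs : List (Option String)) :
    pvHasDup xs = !decide (xs.filter (fun v => !(v == none || v == some ""))).Nodup := by
  induction xs with
  | nil => simp [pvHasDup]
  | cons v rest ih =>
    show (if ((!(v == none || v == some "")) && rest.any (fun w => v == w)) = true then true
          else pvHasDup rest) = _
    by_cases hg : (!(v == none || v == some "")) = true
    · have hfc : (v :: rest).filter (fun w => !(w == none || w == some "")) =
          v :: rest.filter (fun w => !(w == none || w == some "")) := by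
        rw [List.filter_cons, if_pos hg]
      by_cases hm : v ∈ rest
      · have hany : (rest.any (fun w => v == w)) = true := by
          rw [List.any_eq_true]; exact ⟨v, hm, by simp⟩
        have hnot : ¬ (v :: rest.filter (fun w => !(w == none || w == some ""))).Nodup :=
          fun hc => (List.nodup_cons.mp hc).1 (List.mem_filter.mpr ⟨hm, hg⟩)
        rw [hfc, hg, hany, Bool.true_and, if_pos rfl, decide_eq_false hnot, Bool.not_false]
      · have hany : (rest.any (fun w => v == w)) = false := by
          rw [List.any_eq_false]
          intro w hw
          simp only [beq_iff_eq]
          exact fun he => hm (by rw [he]; exact hw)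
        have hmem : v ∉ rest.filter (fun w => !(w == none || w == some "")) :=
          fun hc => hm (List.mem_filter.mp hc).1
        have hiff : (v :: rest.filter (fun w => !(w == none || w == some ""))).Nodup ↔
            (rest.filter (fun w => !(w == none || w == some ""))).Nodup := by
          rw [List.nodup_cons]; exact and_iff_right hmem
        rw [hfc, hany, Bool.and_false, if_neg Bool.false_ne_true, ih,
            decide_eq_decide.mpr hiff]
    · have hgf : (!(v == none || v == some "")) = false := by
        revert hg; cases h : (!(v == none || v == some "")) <;> simp
      have hfc : (v :: rest).filter (fun w => !(w == none || w == some "")) =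
          rest.filter (fun w => !(w == none || w == some "")) := by
        rw [List.filter_cons, if_neg hg]
      rw [hfc, hgf, Bool.false_and, if_neg Bool.false_ne_true]
      exact ih

-- ===== VERDICT (by name: the statement is the Claim_ definition above) =====
theorem check_for_duplicate_parameter_labels_spec : Claim_equal_check_for_duplicate_parameter_labels := by
  intro row _
  unfold Spec_check_for_duplicate_parameter_labels
  have hB : check_for_duplicate_parameter_labels_alt row =
      pvHasDup (pvKeys.map (fun k => (PySem.Dict.mk row).get? k)) := rfl
  rw [hB, pvHasDup_eq_not_nodup]
  simp only [check_for_duplicate_parameter_labels]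
  set fl := (pvKeys.map (fun k => (PySem.Dict.mk row).get? k)).filter
      (fun v => !(v == none || v == some "")) with hfl
  by_cases h : fl.Nodup
  · rw [(length_ofList_eq_iff fl).mpr h]
    simp [h]
  · have : (PySem.Set.ofList fl).length ≠ fl.length :=
      fun hc => h ((length_ofList_eq_iff fl).mp hc)
    simp [h]
    omega
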